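-- pv_equiv track=rewrite | github.com/rublock/test-task-performance-lab | task4/task4.py | first_iter
-- ===== SOURCE A (Python) =====
-- from copy import deepcopy
--
-- def first_iter(nums_list):
--     temp_l = deepcopy(nums_list)
--     target = temp_l[0]
--     count = 0
--     for i in range(len(temp_l)):
--         if temp_l[i] != target:
--             if target < temp_l[i]:
--                 while temp_l[i] != target:
--                     temp_l[i] -= 1
--                     count += 1
--             elif target > temp_l[i]:
--                 while temp_l[i] != target:
--                     temp_l[i] += 1
--                     count += 1
--     return count
-- ===== SOURCE B (Python) =====
-- def first_iter(nums_list):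
--     target = nums_list[0]
--     return sum(abs(x - target) for x in nums_list)
-- ===== Notes on version B (the rewrite author's own statement) =====
-- stated objective: faster
-- what changed: Replaced the per-element unit-step while loops (counting one increment/decrement at a time) with a single pass summing the absolute difference of each element from the first element.
-- outside the precondition, e.g. on first_iter([]): A raises IndexError, B raises IndexError
import Mathlib
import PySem

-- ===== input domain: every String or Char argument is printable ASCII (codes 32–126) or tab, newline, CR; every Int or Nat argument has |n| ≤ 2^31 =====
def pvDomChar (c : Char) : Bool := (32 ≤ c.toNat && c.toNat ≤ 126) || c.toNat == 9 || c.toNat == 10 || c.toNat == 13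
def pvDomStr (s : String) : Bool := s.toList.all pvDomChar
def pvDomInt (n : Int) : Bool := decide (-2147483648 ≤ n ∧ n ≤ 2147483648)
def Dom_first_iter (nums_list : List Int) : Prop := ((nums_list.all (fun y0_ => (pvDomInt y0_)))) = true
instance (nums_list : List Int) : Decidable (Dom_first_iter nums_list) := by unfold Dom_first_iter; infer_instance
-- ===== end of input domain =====

-- B replaces A's unit-step while loops with one pass summing each element's absolute difference from the first element; both raise on the empty list, excluded by Pre_.


-- ===== PORT A =====
-- port of A: the inner while loops step temp_l[i] by one toward target, incrementing count.
-- whileDec/whileInc transcribe them; the while-condition 'temp_l[i] != target' is written as the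
-- ordered guard that holds throughout the loop under the enclosing branch (target < / > temp_l[i]),
-- which Python's loop maintains, so the steps are identical; temp_l[i] is never read again afterwards,
-- so only count is threaded.
def whileDec (cur tgt count : Int) : Int :=
  if h : tgt < cur then whileDec (cur - 1) tgt (count + 1) else count
termination_by (cur - tgt).toNat
decreasing_by simp; omega

def whileInc (cur tgt count : Int) : Int :=
  if h : cur < tgt then whileInc (cur + 1) tgt (count + 1) else count
termination_by (tgt - cur).toNat
decreasing_by simp; omega

def first_iter (nums_list : List Int) : Int :=
  match nums_list with
  | [] => 0  -- Python raises IndexError at temp_l[0]; excluded by Pre_first_iter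
  | target :: _ =>
      nums_list.foldl (fun count x =>
        if x ≠ target then
          if target < x then whileDec x target count
          else if target > x then whileInc x target count
          else count
        else count) 0

-- ===== PORT B =====
def first_iter_alt (nums_list : List Int) : Int :=
  match nums_list with
  | [] => 0  -- Python raises IndexError; excluded by Pre_first_iter
  | target :: _ => nums_list.foldl (fun s x => s + |x - target|) 0

-- ===== PRECONDITION & SPEC =====
-- A (and B) raise IndexError on the empty list (nums_list[0]); excluded.
def Pre_first_iter (nums_list : List Int) : Prop := nums_list ≠ []
instance (nums_list : List Int) : Decidable (Pre_first_iter nums_list) := by unfold Pre_first_iter; infer_instance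
def pvWitness_first_iter : List Int := [3, 1, 7]

def Spec_first_iter (nums_list : List Int) (out : Int) : Prop := out = first_iter_alt nums_list
instance (nums_list : List Int) (out : Int) : Decidable (Spec_first_iter nums_list out) := by unfold Spec_first_iter; infer_instance

-- ===== CLAIM (what is proved, stated in full; the proofs are below) =====
def Claim_equal_first_iter : Prop := ∀ (nums_list : List Int), Dom_first_iter nums_list → Pre_first_iter nums_list → Spec_first_iter nums_list (first_iter nums_list)

-- ===== LEMMAS AND PROOFS =====
theorem whileDec_eq (cur tgt count : Int) (h : tgt < cur) :
    whileDec cur tgt count = count + (cur - tgt) := by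
  have H : ∀ n : ℕ, ∀ cur count : Int, (cur - tgt).toNat = n → tgt < cur →
      whileDec cur tgt count = count + (cur - tgt) := by
    intro n
    induction n with
    | zero => intro cur count hn hlt; omega
    | succ k ih =>
      intro cur count hn hlt
      rw [whileDec, dif_pos hlt]
      by_cases h2 : tgt < cur - 1
      · rw [ih (cur - 1) (count + 1) (by omega) h2]; ring
      · have : cur - 1 = tgt := by omega
        rw [whileDec, dif_neg (by omega)]; omega
  exact H (cur - tgt).toNat cur count rfl h

theorem whileInc_eq (cur tgt count : Int) (h : cur < tgt) :
    whileInc cur tgt count = count + (tgt - cur) := by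
  have H : ∀ n : ℕ, ∀ cur count : Int, (tgt - cur).toNat = n → cur < tgt →
      whileInc cur tgt count = count + (tgt - cur) := by
    intro n
    induction n with
    | zero => intro cur count hn hlt; omega
    | succ k ih =>
      intro cur count hn hlt
      rw [whileInc, dif_pos hlt]
      by_cases h2 : cur + 1 < tgt
      · rw [ih (cur + 1) (count + 1) (by omega) h2]; ring
      · have : cur + 1 = tgt := by omega
        rw [whileInc, dif_neg (by omega)]; omega
  exact H (tgt - cur).toNat cur count rfl h

theorem step_eq (target : Int) :
    (fun count x =>
        if x ≠ target then
          if target < x then whileDec x target count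
          else if target > x then whileInc x target count
          else count
        else count) = (fun s x : Int => s + |x - target|) := by
  funext count x
  by_cases hne : x = target
  · simp [hne]
  · simp only [hne, ne_eq, not_false_iff, if_true]
    by_cases hlt : target < x
    · rw [if_pos hlt, whileDec_eq x target count hlt, abs_of_pos (by omega)]
    · have hgt : target > x := by omega
      rw [if_neg hlt, if_pos hgt, whileInc_eq x target count hgt,
        abs_of_neg (by omega)]
      ring

-- ===== VERDICT (by name: the statement is the Claim_ definition above) =====
theorem first_iter_spec : Claim_equal_first_iter := by
  intro nums_list _ hpre
  match nums_list with
  | [] => exact absurd rfl hpre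
  | target :: rest =>
    simp only [Spec_first_iter, first_iter, first_iter_alt, step_eq target]
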